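-- pv_equiv track=rewrite | github.com/AI-Citizen/SolidGPT | solidgpt/src/workskill/skills/notion_embed.py | cut_content_by_words
-- ===== SOURCE A (Python) =====
-- def cut_content_by_words(page_content_str, word_limit=500):
--     words = page_content_str.split()  # Split the content into words
--     segments = []  # List to hold all segments
--     current_segment = []  # Current segment being filled with words
--
--     for word in words:
--         # Add word to current segment if it doesn't exceed the word limit
--         if len(current_segment) < word_limit:
--             current_segment.append(word)
--         else:
--             # If the current segment reached the word limit, join it into a string and add to segments list
--             segments.append(' '.join(current_segment))
--             current_segment = [word]  # Start a new segment with the current word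
--
--     # Add the last segment if it has any words
--     if current_segment:
--         segments.append(' '.join(current_segment))
--
--     return segments
-- ===== SOURCE B (Python) =====
-- def cut_content_by_words(page_content_str, word_limit=500):
--     words = page_content_str.split()
--     return [' '.join(words[i:i + word_limit])
--             for i in range(0, len(words), word_limit)]
-- ===== Notes on version B (the rewrite author's own statement) =====
-- stated objective: idiomatic
-- what changed: Replaces the word-by-word accumulator with flush-on-full by arithmetic chunk boundaries: one stride loop over range(0, len(words), word_limit) emitting ' '.join(words[i:i+word_limit]).
-- intended difference: For negative word_limit on text containing at least one word, A's length check never passes so it returns a spurious leading empty segment followed by each word as its own segment (['']+words), a leftover-accumulator artefact; B returns no segments ([]), the intended result for a nonsensical nonpositive limit. — e.g. on cut_content_by_words("a b", -1): A returns ["", "a", "b"], B returns []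
-- outside the precondition, e.g. on cut_content_by_words('a b', 0): A returns ['', 'a', 'b'], B raises ValueError
import Mathlib
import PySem

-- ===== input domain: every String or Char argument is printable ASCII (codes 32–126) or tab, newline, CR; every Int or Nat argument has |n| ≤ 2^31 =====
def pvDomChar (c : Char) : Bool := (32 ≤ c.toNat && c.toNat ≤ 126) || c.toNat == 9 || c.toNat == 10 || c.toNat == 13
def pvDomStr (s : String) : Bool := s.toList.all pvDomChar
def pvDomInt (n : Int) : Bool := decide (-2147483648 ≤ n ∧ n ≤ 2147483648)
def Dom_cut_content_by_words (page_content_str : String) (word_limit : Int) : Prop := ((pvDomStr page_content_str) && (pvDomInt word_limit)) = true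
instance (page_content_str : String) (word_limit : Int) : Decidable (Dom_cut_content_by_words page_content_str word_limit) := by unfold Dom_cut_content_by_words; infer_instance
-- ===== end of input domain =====

-- B replaces A's word-by-word accumulator (flush on full) by one stride loop over
-- range(0, len(words), word_limit) joining the slice words[i:i+word_limit] (idiomatic; return value only).

-- ===== PORT A =====
-- loop body of A: add the word to the current segment if it is below the limit, else flush and restart
def pvStep (word_limit : Int) (acc : List String × List String) (word : String) : List String × List String :=
  if (acc.2.length : Int) < word_limit then (acc.1, acc.2 ++ [word])
  else (acc.1 ++ [PySem.Str.join " " acc.2], [word])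

def cut_content_by_words (page_content_str : String) (word_limit : Int) : List String :=
  let words := PySem.Str.split₀ page_content_str
  let r := words.foldl (pvStep word_limit) ([], [])
  if r.2 ≠ [] then r.1 ++ [PySem.Str.join " " r.2] else r.1

-- ===== PORT B =====
def cut_content_by_words_alt (page_content_str : String) (word_limit : Int) : List String :=
  let words := PySem.Str.split₀ page_content_str
  (PySem.List.pyRange 0 (words.length : Int) word_limit).map
    (fun i => PySem.Str.join " " (PySem.List.slice words (some i) (some (i + word_limit))))

-- ===== PRECONDITION & SPEC =====
-- Pre_ excludes only word_limit = 0, where A returns a value but B's range(0, n, 0) raises ValueError.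
def Pre_cut_content_by_words (page_content_str : String) (word_limit : Int) : Prop :=
  word_limit ≠ 0
instance (page_content_str : String) (word_limit : Int) : Decidable (Pre_cut_content_by_words page_content_str word_limit) := by unfold Pre_cut_content_by_words; infer_instance

def pvWitness_cut_content_by_words : String × Int := ("a b", 1)

-- For negative word_limit on text containing at least one word, A's length check never passes, so A
-- returns a spurious leading empty segment followed by each word alone ([''] + words), a
-- leftover-accumulator artefact; B returns no segments ([]), the intended result for a nonsensical
-- nonpositive limit.
def D_cut_content_by_words (page_content_str : String) (word_limit : Int) : Prop :=
  word_limit < 0 ∧ PySem.Str.split₀ page_content_str ≠ []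
instance (page_content_str : String) (word_limit : Int) : Decidable (D_cut_content_by_words page_content_str word_limit) := by unfold D_cut_content_by_words; infer_instance

def Spec_cut_content_by_words (page_content_str : String) (word_limit : Int) (out : List String) : Prop := ¬ D_cut_content_by_words page_content_str word_limit → out = cut_content_by_words_alt page_content_str word_limit
instance (page_content_str : String) (word_limit : Int) (out : List String) : Decidable (Spec_cut_content_by_words page_content_str word_limit out) := by unfold Spec_cut_content_by_words; infer_instance

def pvDiffWitness_cut_content_by_words : String × Int := ("a b", -1)
def pvDiffWitnessOut_cut_content_by_words : (List String) × (List String) := (["", "a", "b"], [])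

-- ===== CLAIM (what is proved, stated in full; the proofs are below) =====
def Claim_unchanged_cut_content_by_words : Prop := ∀ (page_content_str : String) (word_limit : Int), Dom_cut_content_by_words page_content_str word_limit → Pre_cut_content_by_words page_content_str word_limit → Spec_cut_content_by_words page_content_str word_limit (cut_content_by_words page_content_str word_limit)
def Claim_changed_cut_content_by_words : Prop := Dom_cut_content_by_words (pvDiffWitness_cut_content_by_words.1) (pvDiffWitness_cut_content_by_words.2) ∧ Pre_cut_content_by_words (pvDiffWitness_cut_content_by_words.1) (pvDiffWitness_cut_content_by_words.2) ∧ D_cut_content_by_words (pvDiffWitness_cut_content_by_words.1) (pvDiffWitness_cut_content_by_words.2) ∧ cut_content_by_words (pvDiffWitness_cut_content_by_words.1) (pvDiffWitness_cut_content_by_words.2) = pvDiffWitnessOut_cut_content_by_words.1 ∧ cut_content_by_words_alt (pvDiffWitness_cut_content_by_words.1) (pvDiffWitness_cut_content_by_words.2) = pvDiffWitnessOut_cut_content_by_words.2 ∧ pvDiffWitnessOut_cut_content_by_words.1 ≠ pvDiffWitnessOut_cut_content_by_words.2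
def Claim_exact_cut_content_by_words : Prop := ∀ (page_content_str : String) (word_limit : Int), Dom_cut_content_by_words page_content_str word_limit → Pre_cut_content_by_words page_content_str word_limit → D_cut_content_by_words page_content_str word_limit → cut_content_by_words page_content_str word_limit ≠ cut_content_by_words_alt page_content_str word_limit

-- ===== LEMMAS AND PROOFS =====

-- the common shape: the words grouped into blocks of t+1, each joined with spaces
def pvChunks (t : Nat) : List String → List String
  | [] => []
  | w :: rest => PySem.Str.join " " (w :: rest.take t) :: pvChunks t (rest.drop t)
termination_by ws => ws.length
decreasing_by simp

theorem pvChunks_nil (t : Nat) : pvChunks t [] = [] := by simp only [pvChunks]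

theorem pvChunks_cons (t : Nat) (w : String) (rest : List String) :
    pvChunks t (w :: rest) = PySem.Str.join " " (w :: rest.take t) :: pvChunks t (rest.drop t) := by
  simp only [pvChunks]

-- A's fold, post-processed, computes pvChunks (word-by-word invariant)
theorem pvFoldA_eq_chunks (wl : Int) (hwl : 1 ≤ wl) :
    ∀ (n : Nat) (ws : List String) (cur segs : List String), ws.length ≤ n →
      (cur.length : Int) ≤ wl →
      (let r := ws.foldl (pvStep wl) (segs, cur);
        if r.2 ≠ [] then r.1 ++ [PySem.Str.join " " r.2] else r.1)
        = segs ++ pvChunks (wl.toNat - 1) (cur ++ ws) := by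
  intro n
  induction n with
  | zero =>
    intro ws cur segs hlen hcur
    have hws : ws = [] := List.eq_nil_of_length_eq_zero (Nat.le_zero.mp hlen)
    subst hws
    simp only [List.foldl_nil, List.append_nil]
    cases cur with
    | nil => simp [pvChunks_nil]
    | cons c cr =>
      have h1 : cr.length ≤ wl.toNat - 1 := by
        simp at hcur; omega
      simp [pvChunks_cons, pvChunks_nil, List.take_of_length_le h1, List.drop_eq_nil_of_le h1]
  | succ n ih =>
    intro ws cur segs hlen hcur
    cases ws with
    | nil =>
      simp only [List.foldl_nil, List.append_nil]
      cases cur with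
      | nil => simp [pvChunks_nil]
      | cons c cr =>
        have h1 : cr.length ≤ wl.toNat - 1 := by
          simp at hcur; omega
        simp [pvChunks_cons, pvChunks_nil, List.take_of_length_le h1, List.drop_eq_nil_of_le h1]
    | cons w ws' =>
      by_cases hc : (cur.length : Int) < wl
      · have hstep : pvStep wl (segs, cur) w = (segs, cur ++ [w]) := by
          simp [pvStep, hc]
        have hlen' : ws'.length ≤ n := by simp at hlen; omega
        have hcur' : ((cur ++ [w]).length : Int) ≤ wl := by simp; omega
        calc _ = (let r := ws'.foldl (pvStep wl) (segs, cur ++ [w]);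
                    if r.2 ≠ [] then r.1 ++ [PySem.Str.join " " r.2] else r.1) := by
                  simp only [List.foldl_cons, hstep]
          _ = segs ++ pvChunks (wl.toNat - 1) ((cur ++ [w]) ++ ws') := ih ws' (cur ++ [w]) segs hlen' hcur'
          _ = segs ++ pvChunks (wl.toNat - 1) (cur ++ w :: ws') := by simp
      · cases cur with
        | nil => exfalso; simp at hc; omega
        | cons c cr =>
          have hfull : cr.length + 1 = wl.toNat := by
            rw [List.length_cons] at hc hcur; omega
          have hstep : pvStep wl (segs, c :: cr) w = (segs ++ [PySem.Str.join " " (c :: cr)], [w]) := by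
            unfold pvStep
            rw [if_neg hc]
          have hlen' : ws'.length ≤ n := by simp at hlen; omega
          have hcr : cr.length = wl.toNat - 1 := by omega
          have hcur' : (([w] : List String).length : Int) ≤ wl := by simp; omega
          calc _ = (let r := ws'.foldl (pvStep wl) (segs ++ [PySem.Str.join " " (c :: cr)], [w]);
                      if r.2 ≠ [] then r.1 ++ [PySem.Str.join " " r.2] else r.1) := by
                    simp only [List.foldl_cons, hstep]
            _ = (segs ++ [PySem.Str.join " " (c :: cr)]) ++ pvChunks (wl.toNat - 1) ([w] ++ ws') :=
                  ih ws' [w] _ hlen' hcur'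
            _ = segs ++ pvChunks (wl.toNat - 1) ((c :: cr) ++ w :: ws') := by
                  rw [show ((c :: cr) ++ w :: ws') = c :: (cr ++ w :: ws') from rfl]
                  rw [pvChunks_cons]
                  rw [List.take_append_of_le_length (by omega), List.drop_append_of_le_length (by omega)]
                  simp [List.take_of_length_le (le_of_eq hcr), List.drop_eq_nil_of_le (le_of_eq hcr)]

-- range cons step for a positive stride
theorem pvRange_pos_cons (a b s : Int) (hs : 0 < s) (hab : a < b) :
    PySem.List.pyRange a b s = a :: PySem.List.pyRange (a + s) b s := by
  rw [PySem.List.pyRange_of_pos a b hs, PySem.List.pyRange_of_pos (a + s) b hs]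
  rw [if_pos hab]
  have hq : (b - a + s - 1) / s = (b - a - 1) / s + 1 := by
    rw [show b - a + s - 1 = (b - a - 1) + 1 * s by ring,
      Int.add_mul_ediv_right _ _ (show s ≠ 0 by omega)]
  have hqnn : 0 ≤ (b - a - 1) / s := Int.ediv_nonneg (by omega) (by omega)
  by_cases h2 : a + s < b
  · rw [if_pos h2]
    rw [show b - (a + s) + s - 1 = b - a - 1 by ring, hq]
    rw [show ((b - a - 1) / s + 1).toNat = ((b - a - 1) / s).toNat + 1 by omega]
    rw [List.range_succ_eq_map, List.map_cons, List.map_map]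
    congr 1
    · simp
    · apply List.map_congr_left
      intro k _
      simp only [Function.comp_apply]
      push_cast
      ring
  · rw [if_neg h2]
    have hz : (b - a - 1) / s = 0 := Int.ediv_eq_zero_of_lt (by omega) (by omega)
    rw [hq, hz]
    norm_num [List.range_succ]

theorem pvRange_pos_nil (a b s : Int) (hs : 0 < s) (hab : b ≤ a) :
    PySem.List.pyRange a b s = [] := by
  rw [PySem.List.pyRange_of_pos a b hs]
  simp [show ¬ (a < b) from by omega]

theorem pvRange_nonneg_nil (b s : Int) (hs : s < 0) (hb : 0 ≤ b) :
    PySem.List.pyRange 0 b s = [] := by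
  unfold PySem.List.pyRange
  simp [show ¬ (s = 0) from by omega, show ¬ (0 < s) from by omega, show ¬ (b < 0) from by omega]

-- B's stride map computes pvChunks
theorem pvMapB_eq_chunks (wl : Int) (hwl : 1 ≤ wl) (ws0 : List String) :
    ∀ (n : Nat) (a : Nat), ws0.length ≤ a + n →
      (PySem.List.pyRange (a : Int) (ws0.length : Int) wl).map
          (fun i => PySem.Str.join " " (PySem.List.slice ws0 (some i) (some (i + wl))))
        = pvChunks (wl.toNat - 1) (ws0.drop a) := by
  intro n
  induction n with
  | zero =>
    intro a hlen
    rw [pvRange_pos_nil _ _ _ (by omega) (by simp; omega)]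
    rw [List.drop_eq_nil_of_le (by omega)]
    simp [pvChunks_nil]
  | succ n ih =>
    intro a hlen
    by_cases hend : ws0.length ≤ a
    · rw [pvRange_pos_nil _ _ _ (by omega) (by simp; omega)]
      rw [List.drop_eq_nil_of_le hend]
      simp [pvChunks_nil]
    · push_neg at hend
      rw [pvRange_pos_cons _ _ _ (by omega) (by exact_mod_cast hend)]
      have hcast : ((a : Int) + wl) = ((a + wl.toNat : Nat) : Int) := by push_cast; omega
      rw [List.map_cons, hcast, ih (a + wl.toNat) (by omega)]
      have hslice : PySem.List.slice ws0 (some ((a : Nat) : Int)) (some (((a + wl.toNat : Nat) : Nat) : Int))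
          = (ws0.drop a).take wl.toNat := by
        rw [PySem.List.slice_natCast]
        congr 1
        omega
      rw [hslice]
      obtain ⟨w, rest, hd⟩ : ∃ w rest, ws0.drop a = w :: rest := by
        cases hdrop : ws0.drop a with
        | nil => exfalso; have := List.drop_eq_nil_iff.mp hdrop; omega
        | cons w rest => exact ⟨w, rest, rfl⟩
      rw [hd, pvChunks_cons]
      congr 1
      · congr 1
        conv_lhs => rw [show wl.toNat = (wl.toNat - 1) + 1 by omega]
        rw [List.take_succ_cons]
      · congr 1
        rw [← List.drop_drop, hd]
        conv_lhs => rw [show wl.toNat = (wl.toNat - 1) + 1 by omega]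
        rw [List.drop_succ_cons]

-- with a nonempty word list A's fold always ends with a nonempty current segment
theorem pvFoldA_snd_ne (wl : Int) :
    ∀ (ws : List String) (p : List String × List String), p.2 ≠ [] →
      (ws.foldl (pvStep wl) p).2 ≠ [] := by
  intro ws
  induction ws with
  | nil => intro p h; simpa using h
  | cons w ws' ih =>
    intro p _
    rw [List.foldl_cons]
    apply ih
    unfold pvStep
    split <;> simp

-- ===== VERDICT (by name: the statement is the Claim_ definition above) =====
theorem cut_content_by_words_spec : Claim_unchanged_cut_content_by_words := by
  intro s wl _ hpre hnd
  unfold Pre_cut_content_by_words at hpre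
  unfold D_cut_content_by_words at hnd
  simp only [cut_content_by_words, cut_content_by_words_alt]
  by_cases hpos : 1 ≤ wl
  · have h0 := pvFoldA_eq_chunks wl hpos (PySem.Str.split₀ s).length (PySem.Str.split₀ s) [] []
      (le_refl _) (by simp; omega)
    have h1 := pvMapB_eq_chunks wl hpos (PySem.Str.split₀ s) (PySem.Str.split₀ s).length 0
      (by omega)
    simp only [List.nil_append] at h0
    simp only [List.drop_zero, Nat.cast_zero] at h1
    simpa [h1] using h0
  · have hneg : wl < 0 := by omega
    have hws : PySem.Str.split₀ s = [] := by
      by_contra h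
      exact hnd ⟨hneg, h⟩
    rw [hws]
    simp [pvRange_nonneg_nil 0 wl hneg le_rfl]

theorem cut_content_by_words_changed : Claim_changed_cut_content_by_words := by
  unfold Claim_changed_cut_content_by_words; decide

theorem cut_content_by_words_tight : Claim_exact_cut_content_by_words := by
  intro s wl _ _ hd
  obtain ⟨hneg, hws⟩ := hd
  cases hws0 : PySem.Str.split₀ s with
  | nil => exact absurd hws0 hws
  | cons w rest =>
    have hB : cut_content_by_words_alt s wl = [] := by
      simp [cut_content_by_words_alt, pvRange_nonneg_nil _ _ hneg (Int.natCast_nonneg _)]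
    have hne : (List.foldl (pvStep wl) (([], []) : List String × List String) (w :: rest)).2 ≠ [] := by
      rw [List.foldl_cons]
      apply pvFoldA_snd_ne
      unfold pvStep
      split <;> simp
    have hne' : (List.foldl (pvStep wl) (pvStep wl ([], []) w) rest).2 ≠ [] := by
      rw [List.foldl_cons] at hne
      exact hne
    have hA : cut_content_by_words s wl ≠ [] := by
      simp [cut_content_by_words, hws0, hne']
    rw [hB]
    exact hA
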